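-- pv_equiv track=rewrite | github.com/InfinityPacer/MoviePilot-Plugins | plugins/autodiagnosis/__init__.py | __format_results
-- ===== SOURCE A (Python) =====
-- def __format_results(type_label, results, include_details: bool = False):
--     """格式化模块或站点的结果信息"""
--     lines = []
--     if any(not res.get("state") for res in results):
--         lines.append(f"{type_label}：异常")
--         for result in results:
--             if not result.get("state"):
--                 error_message = f"，异常信息：{result.get('errmsg')}" if result.get("errmsg") else ""
--                 lines.append(f"- {result.get('name', '未知')}{error_message}")
--     else:
--         lines.append(f"{type_label}：正常")
--         if include_details:
--             for result in results:
--                 error_message = f"，{result.get('result')}" if result.get("result") else "正常"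
--                 lines.append(f"- {result.get('name', '未知')}{error_message}")
--
--     return lines
-- ===== SOURCE B (Python) =====
-- def __format_results(type_label, results, include_details: bool = False):
--     """格式化模块或站点的结果信息"""
--     fail_lines = []
--     detail_lines = []
--     for r in results:
--         name = r.get('name', '未知')
--         if not r.get("state"):
--             err = f"，异常信息：{r.get('errmsg')}" if r.get("errmsg") else ""
--             fail_lines.append(f"- {name}{err}")
--         detail_lines.append(f"- {name}" + (f"，{r.get('result')}" if r.get("result") else "正常"))
--     if fail_lines:
--         return [f"{type_label}：异常"] + fail_lines
--     return [f"{type_label}：正常"] + (detail_lines if include_details else [])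
-- ===== Notes on version B (the rewrite author's own statement) =====
-- stated objective: alternative
-- what changed: B traverses results exactly once, accumulating the failure rendering and the detail rendering simultaneously in two lists, then picks header and body from them; A instead pre-scans with any() and then re-traverses results a second time in whichever branch applies.
import Mathlib
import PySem

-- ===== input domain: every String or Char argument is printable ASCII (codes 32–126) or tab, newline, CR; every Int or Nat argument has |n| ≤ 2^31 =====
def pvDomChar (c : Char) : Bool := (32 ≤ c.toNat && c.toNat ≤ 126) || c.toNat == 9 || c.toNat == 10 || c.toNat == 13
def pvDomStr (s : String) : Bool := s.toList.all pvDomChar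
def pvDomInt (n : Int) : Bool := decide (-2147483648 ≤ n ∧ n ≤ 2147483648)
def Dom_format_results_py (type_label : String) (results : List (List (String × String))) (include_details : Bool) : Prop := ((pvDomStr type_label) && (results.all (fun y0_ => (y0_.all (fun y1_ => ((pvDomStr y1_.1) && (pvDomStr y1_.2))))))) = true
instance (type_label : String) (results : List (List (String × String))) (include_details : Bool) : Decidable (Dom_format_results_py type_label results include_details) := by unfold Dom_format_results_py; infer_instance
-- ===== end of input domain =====

-- B traverses results once, building the failure and detail renderings together
-- in one pass, instead of A's any() pre-scan plus a second branch-specific loop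
-- (objective: alternative decomposition, same cost).

-- ===== PORT A =====
-- dict.get(k) on an association list: first match (exact for Python dict lookup)
def pvDictGet (r : List (String × String)) (k : String) : Option String :=
  (r.find? (fun p => p.1 == k)).map (·.2)

-- Python truthiness of an Optional[str]: None and "" are falsy
def pvTruthy (o : Option String) : Bool :=
  match o with
  | none => false
  | some s => !(s == "")

-- the f-string "- {name}{error_message}" of A's failure loop (shared by B's pass)
def pvFailLine (r : List (String × String)) : String :=
  "- " ++ ((pvDictGet r "name").getD "未知") ++
    (if pvTruthy (pvDictGet r "errmsg") then "，异常信息：" ++ ((pvDictGet r "errmsg").getD "") else "")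

-- the f-string "- {name}{error_message}" of A's detail loop (shared by B's pass)
def pvDetailLine (r : List (String × String)) : String :=
  "- " ++ ((pvDictGet r "name").getD "未知") ++
    (if pvTruthy (pvDictGet r "result") then "，" ++ ((pvDictGet r "result").getD "") else "正常")

def format_results_py (type_label : String) (results : List (List (String × String))) (include_details : Bool) : List String :=
  if results.any (fun res => !pvTruthy (pvDictGet res "state")) then
    results.foldl
      (fun lines result =>
        if !pvTruthy (pvDictGet result "state") then lines ++ [pvFailLine result] else lines)
      [type_label ++ "：异常"]
  else
    let lines := [type_label ++ "：正常"]
    if include_details then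
      results.foldl (fun lines result => lines ++ [pvDetailLine result]) lines
    else
      lines

-- ===== PORT B =====
-- Source B's single loop: one fold carrying the pair (fail_lines, detail_lines)
def format_results_py_alt (type_label : String) (results : List (List (String × String))) (include_details : Bool) : List String :=
  let acc := results.foldl
    (fun (acc : List String × List String) r =>
      ( if !pvTruthy (pvDictGet r "state") then acc.1 ++ [pvFailLine r] else acc.1,
        acc.2 ++ [pvDetailLine r] ))
    ([], [])
  if !acc.1.isEmpty then
    [type_label ++ "：异常"] ++ acc.1
  else
    [type_label ++ "：正常"] ++ (if include_details then acc.2 else [])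

-- ===== PRECONDITION & SPEC =====
def Spec_format_results_py (type_label : String) (results : List (List (String × String))) (include_details : Bool) (out : List String) : Prop := out = format_results_py_alt type_label results include_details
instance (type_label : String) (results : List (List (String × String))) (include_details : Bool) (out : List String) : Decidable (Spec_format_results_py type_label results include_details out) := by unfold Spec_format_results_py; infer_instance

-- ===== CLAIM =====
def Claim_equal_format_results_py : Prop := ∀ (type_label : String) (results : List (List (String × String))) (include_details : Bool), Dom_format_results_py type_label results include_details → Spec_format_results_py type_label results include_details (format_results_py type_label results include_details)

-- ===== LEMMAS AND PROOFS =====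

-- B's paired fold computes (filtered failure lines, all detail lines)
theorem pvScan_eq (xs : List (List (String × String))) (f0 d0 : List String) :
    xs.foldl
      (fun (acc : List String × List String) r =>
        ( if !pvTruthy (pvDictGet r "state") then acc.1 ++ [pvFailLine r] else acc.1,
          acc.2 ++ [pvDetailLine r] ))
      (f0, d0)
    = (f0 ++ (xs.filter (fun r => !pvTruthy (pvDictGet r "state"))).map pvFailLine,
       d0 ++ xs.map pvDetailLine) := by
  induction xs generalizing f0 d0 with
  | nil => simp
  | cons x xs ih =>
      rw [List.foldl_cons, ih, List.filter_cons]
      by_cases h : (!pvTruthy (pvDictGet x "state")) = true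
      · rw [if_pos h, if_pos h]
        simp
      · rw [if_neg h, if_neg h]
        simp

-- "any p" agrees with "filter p is nonempty"
theorem pvAny_eq_not_isEmpty_filter {α : Type} (p : α → Bool) (xs : List α) :
    xs.any p = !(xs.filter p).isEmpty := by
  induction xs with
  | nil => rfl
  | cons x xs ih =>
      by_cases h : p x <;> simp [List.any_cons, h, ih]

-- ===== VERDICT =====
theorem format_results_py_spec : Claim_equal_format_results_py := by
  intro tl results incl _
  unfold Spec_format_results_py format_results_py format_results_py_alt
  rw [pvScan_eq, pvAny_eq_not_isEmpty_filter]
  simp only [List.nil_append, List.isEmpty_map]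
  by_cases h : (List.filter (fun r => !pvTruthy (pvDictGet r "state")) results).isEmpty = true
  · simp only [h, Bool.not_true, Bool.false_eq_true, if_false]
    cases incl with
    | false => rfl
    | true =>
        simp only [eq_self_iff_true, if_true]
        rw [PySem.List.foldl_append_singleton_eq_map]
  · simp only [Bool.not_eq_true] at h
    simp only [h, Bool.not_false, eq_self_iff_true, if_true]
    rw [PySem.List.foldl_append_if]
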